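-- pv_equiv track=rewrite | github.com/m-rishabh-007/Platform_questions | medium_28_generalized_k_nacci_sequence_summation/solution.py | sum_k_nacci_sequence
-- ===== SOURCE A (Python) =====
-- def sum_k_nacci_sequence(n, k):
--     """
--     :type n: int
--     :type k: int
--     :rtype: int
--     """
--     if n < 0:
--         return 0
--
--     # If n is less than k, we only have base cases (all 1s)
--     if n < k:
--         return n + 1
--
--     # Initialize the first k terms (all 1s)
--     terms = [1] * k
--     total_sum = k  # Sum of first k terms
--
--     # Calculate terms from index k to n
--     for i in range(k, n + 1):
--         # Calculate the next term as sum of previous k terms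
--         next_term = sum(terms)
--         total_sum += next_term
--
--         # Update the sliding window by shifting left and adding new term
--         for j in range(k - 1):
--             terms[j] = terms[j + 1]
--         terms[k - 1] = next_term
--
--     return total_sum
-- ===== SOURCE B (Python) =====
-- def sum_k_nacci_sequence(n, k):
--     """
--     :type n: int
--     :type k: int
--     :rtype: int
--     """
--     if n < 0:
--         return 0
--     if n < k:
--         return n + 1
--     # Keep the whole sequence and a running window sum: each new term is the
--     # current window sum; update the window in O(1) instead of re-summing k terms.
--     hist = [1] * k
--     window = k
--     total = k
--     for i in range(k, n + 1):
--         nxt = window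
--         total += nxt
--         hist.append(nxt)
--         window += nxt - hist[i - k]
--     return total
-- ===== Notes on version B (the rewrite author's own statement) =====
-- stated objective: faster
-- what changed: B keeps a running window sum over a growing history list and updates it in O(1) per term, instead of A's re-summing and left-shifting the k-element window on every iteration.
import Mathlib
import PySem

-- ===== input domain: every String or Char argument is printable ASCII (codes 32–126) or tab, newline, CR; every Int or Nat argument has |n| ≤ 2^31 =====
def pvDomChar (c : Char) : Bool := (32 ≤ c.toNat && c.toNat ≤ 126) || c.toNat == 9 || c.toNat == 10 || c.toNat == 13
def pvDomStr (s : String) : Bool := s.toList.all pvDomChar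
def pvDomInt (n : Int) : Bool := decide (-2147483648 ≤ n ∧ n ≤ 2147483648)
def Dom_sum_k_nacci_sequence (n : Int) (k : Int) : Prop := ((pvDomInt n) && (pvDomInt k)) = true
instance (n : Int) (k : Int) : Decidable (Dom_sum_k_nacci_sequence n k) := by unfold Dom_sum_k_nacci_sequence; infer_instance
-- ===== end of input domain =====

-- B replaces A's per-step O(k) re-summation and shift of the k-window by a running window
-- sum over the growing sequence list, updated in O(1) per term (O(n) instead of O(n*k)).

-- ===== PORT A =====
-- inner loop 'for j in range(k-1): terms[j] = terms[j+1]' (the reads terms[j+1] are always in range, so pyGetD is exact)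
def pvShiftA (k : Int) (ts : List Int) : List Int :=
  (PySem.List.pyRange 0 (k-1) 1).foldl (fun ts j => ts.set j.toNat (PySem.List.pyGetD ts (j+1) 0)) ts


-- body of 'for i in range(k, n+1)'; state = (terms, total_sum); the loop variable i is unused by A
def pvStepA (k : Int) (st : List Int × Int) : List Int × Int :=
  let next := st.1.sum
  ((pvShiftA k st.1).set (k-1).toNat next, st.2 + next)

def sum_k_nacci_sequence (n : Int) (k : Int) : Int :=
  if n < 0 then 0
  else if n < k then n + 1
  else
    ((PySem.List.pyRange k (n+1) 1).foldl (fun st _i => pvStepA k st)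
      (List.replicate k.toNat 1, k)).2

-- ===== PORT B =====
-- body of B's loop; state = (hist, window, total); 'hist[i-k]' is always in range, so pyGetD is exact
def pvStepB (k : Int) (st : List Int × Int × Int) (i : Int) : List Int × Int × Int :=
  let nxt := st.2.1
  let hist := st.1 ++ [nxt]
  (hist, st.2.1 + nxt - PySem.List.pyGetD hist (i - k) 0, st.2.2 + nxt)

def sum_k_nacci_sequence_alt (n : Int) (k : Int) : Int :=
  if n < 0 then 0
  else if n < k then n + 1
  else
    ((PySem.List.pyRange k (n+1) 1).foldl (pvStepB k)
      (List.replicate k.toNat 1, k, k)).2.2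

-- ===== PRECONDITION & SPEC =====
-- Pre_ excludes exactly the inputs with n ≥ 0 and k ≤ 0, on which A raises IndexError
-- (terms[k-1] on the empty list); it admits every input on which A returns.
def Pre_sum_k_nacci_sequence (n : Int) (k : Int) : Prop := n < 0 ∨ 1 ≤ k
instance (n : Int) (k : Int) : Decidable (Pre_sum_k_nacci_sequence n k) := by unfold Pre_sum_k_nacci_sequence; infer_instance
def pvWitness_sum_k_nacci_sequence : Int × Int := (10, 3)

def Spec_sum_k_nacci_sequence (n : Int) (k : Int) (out : Int) : Prop := out = sum_k_nacci_sequence_alt n k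
instance (n : Int) (k : Int) (out : Int) : Decidable (Spec_sum_k_nacci_sequence n k out) := by unfold Spec_sum_k_nacci_sequence; infer_instance

-- ===== CLAIM (what is proved, stated in full; the proofs are below) =====
def Claim_equal_sum_k_nacci_sequence : Prop := ∀ (n : Int) (k : Int), Dom_sum_k_nacci_sequence n k → Pre_sum_k_nacci_sequence n k → Spec_sum_k_nacci_sequence n k (sum_k_nacci_sequence n k)

-- ===== LEMMAS AND PROOFS =====

theorem pvShiftA_key (ts : List Int) :
    ∀ m : Nat, m + 1 ≤ ts.length →
    (PySem.List.pyRange 0 (m : Int) 1).foldl (fun ts j => ts.set j.toNat (PySem.List.pyGetD ts (j+1) 0)) ts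
      = (ts.drop 1).take m ++ ts.drop m := by
  intro m
  induction m with
  | zero => intro _; simp [PySem.List.pyRange_one_eq_nil]
  | succ m ih =>
    intro h
    have hm : ((m+1 : Nat) : Int) = (m : Int) + 1 := by push_cast; ring
    rw [hm, PySem.List.pyRange_one_succ_right (by positivity), List.foldl_append, ih (by omega)]
    simp only [List.foldl_cons, List.foldl_nil]
    have hlt : m ≤ (ts.drop 1).length := by simp; omega
    have hlen : ((ts.drop 1).take m).length = m := by simp; omega
    have hg : PySem.List.pyGetD ((ts.drop 1).take m ++ ts.drop m) ((m:Int)+1) 0 = ts[m+1]'(by omega) := by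
      rw [show ((m:Int)+1) = ((m+1 : Nat) : Int) by push_cast; ring, PySem.List.pyGetD_natCast]
      rw [List.getD_eq_getElem _ _ (by simp; omega)]
      rw [List.getElem_append_right (by omega)]
      simp
      congr 1
      omega
    rw [hg]
    rw [show ((m:Int).toNat) = m by omega]
    rw [List.set_append, if_neg (by omega)]
    rw [hlen, Nat.sub_self]
    rw [List.drop_eq_getElem_cons (show m < ts.length by omega)]
    simp only [List.set_cons_zero]
    rw [List.take_add_one]
    have : (ts.drop 1)[m]? = some (ts[m+1]'(by omega)) := by
      rw [List.getElem?_drop]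
      rw [List.getElem?_eq_getElem (by omega)]
      simp [Nat.add_comm]
    rw [this]
    simp

theorem pvShiftA_set (k : Int) (hk : 1 ≤ k) (ts : List Int) (hlen : ts.length = k.toNat) (v : Int) :
    (pvShiftA k ts).set (k-1).toNat v = ts.drop 1 ++ [v] := by
  unfold pvShiftA
  have h1 : k - 1 = ((ts.length - 1 : Nat) : Int) := by omega
  rw [h1, pvShiftA_key ts (ts.length - 1) (by omega)]
  have h2 : (ts.drop 1).take (ts.length - 1) = ts.drop 1 := by
    apply List.take_of_length_le; simp
  rw [h2]
  rw [show (((ts.length - 1 : Nat) : Int)).toNat = ts.length - 1 by omega]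
  rw [List.set_append, if_neg (by simp)]
  rw [List.drop_eq_getElem_cons (show ts.length - 1 < ts.length by omega)]
  have : ts.length - 1 + 1 = ts.length := by omega
  rw [this, List.drop_length]
  simp

def pvTermsOf (hist : List Int) (k : Int) : List Int := hist.drop (hist.length - k.toNat)

theorem pvTermsOf_length (hist : List Int) (k : Int) (h : k.toNat ≤ hist.length) :
    (pvTermsOf hist k).length = k.toNat := by
  unfold pvTermsOf; simp; omega

theorem pvTermsOf_append (hist : List Int) (k : Int) (hk : 1 ≤ k) (h : k.toNat ≤ hist.length) (x : Int) :
    pvTermsOf (hist ++ [x]) k = (pvTermsOf hist k).drop 1 ++ [x] := by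
  unfold pvTermsOf
  rw [List.length_append]
  simp only [List.length_cons, List.length_nil]
  rw [List.drop_append_of_le_length (by omega)]
  rw [List.drop_drop]
  congr 2
  omega

theorem pv_loop_sim (k : Int) (hk : 1 ≤ k) :
    ∀ (m : Nat) (i : Int) (hist : List Int) (total : Int),
      i = (hist.length : Int) → k.toNat ≤ hist.length →
      ((PySem.List.pyRange i (i+m) 1).foldl (fun st _i => pvStepA k st) (pvTermsOf hist k, total)).2
      = ((PySem.List.pyRange i (i+m) 1).foldl (pvStepB k) (hist, (pvTermsOf hist k).sum, total)).2.2 := by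
  intro m
  induction m with
  | zero =>
    intro i hist total _ _
    simp [PySem.List.pyRange_one_eq_nil]
  | succ m ih =>
    intro i hist total hi hkl
    have hterms : pvTermsOf hist k = List.drop (hist.length - k.toNat) hist := rfl
    have hcast : i + ((m+1 : Nat) : Int) = (i + 1) + (m : Int) := by push_cast; ring
    rw [hcast, PySem.List.pyRange_one_cons (by omega)]
    simp only [List.foldl_cons]
    have hlen : (pvTermsOf hist k).length = k.toNat := pvTermsOf_length hist k hkl
    obtain ⟨t, rest, hts⟩ : ∃ t rest, pvTermsOf hist k = t :: rest := by
      cases h : pvTermsOf hist k with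
      | nil => rw [h] at hlen; simp at hlen; omega
      | cons a l => exact ⟨a, l, rfl⟩
    have hidxlt : hist.length - k.toNat < hist.length := by omega
    have hdrop : hist.drop (hist.length - k.toNat) = t :: rest := by rw [← hterms, hts]
    have hheadeq : hist[hist.length - k.toNat]'hidxlt = t := by
      have h2 := List.drop_eq_getElem_cons hidxlt
      rw [hdrop] at h2
      injection h2 with h3 _
      exact h3.symm
    rw [hts]
    have hlen' : (t :: rest).length = k.toNat := hts ▸ hlen
    have hA : pvStepA k (t :: rest, total)
        = (rest ++ [(t :: rest).sum], total + (t :: rest).sum) := by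
      unfold pvStepA
      simp only
      rw [pvShiftA_set k hk _ hlen']
      simp
    have hget : PySem.List.pyGetD (hist ++ [(t :: rest).sum]) (i - k) 0 = t := by
      rw [show (i - k) = ((hist.length - k.toNat : Nat) : Int) by omega, PySem.List.pyGetD_natCast]
      rw [List.getD_eq_getElem _ _ (by simp)]
      rw [List.getElem_append_left hidxlt]
      exact hheadeq
    have hB : pvStepB k (hist, (t :: rest).sum, total) i
        = (hist ++ [(t :: rest).sum],
           (t :: rest).sum + (t :: rest).sum - t, total + (t :: rest).sum) := by
      unfold pvStepB
      simp only
      rw [hget]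
    rw [hA, hB]
    have happ := pvTermsOf_append hist k hk hkl (t :: rest).sum
    rw [hts] at happ
    simp only [List.drop_one, List.tail_cons] at happ
    have hwin : (t :: rest).sum + (t :: rest).sum - t
        = (pvTermsOf (hist ++ [(t :: rest).sum]) k).sum := by
      rw [happ, List.sum_append]
      simp
      ring
    rw [hwin, show (rest ++ [(t :: rest).sum]) = pvTermsOf (hist ++ [(t :: rest).sum]) k from happ.symm]
    exact ih (i+1) (hist ++ [(t :: rest).sum]) (total + (t :: rest).sum) (by simp; omega) (by simp; omega)

-- ===== VERDICT (by name: the statement is the Claim_ definition above) =====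
theorem sum_k_nacci_sequence_spec : Claim_equal_sum_k_nacci_sequence := by
  intro n k _ hpre
  unfold Spec_sum_k_nacci_sequence sum_k_nacci_sequence sum_k_nacci_sequence_alt
  by_cases hn : n < 0
  · simp [hn]
  · by_cases hnk : n < k
    · simp [hn, hnk]
    · have hk : 1 ≤ k := by
        unfold Pre_sum_k_nacci_sequence at hpre
        omega
      simp only [if_neg hn, if_neg hnk]
      have hterms : pvTermsOf (List.replicate k.toNat 1) k = List.replicate k.toNat 1 := by
        unfold pvTermsOf; simp
      have hsum : (List.replicate k.toNat 1).sum = (k : Int) := by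
        rw [List.sum_replicate]
        simp
        omega
      have hw := pv_loop_sim k hk (n+1-k).toNat k (List.replicate k.toNat 1) k
        (by simp; omega) (by simp)
      rw [hterms, hsum] at hw
      rw [show k + ((n+1-k).toNat : Int) = n + 1 by omega] at hw
      exact hw
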